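-- pv_equiv track=rewrite | github.com/zhou886/Intelligent_computation_homework1 | main.py | cross_operation
-- ===== SOURCE A (Python) =====
-- def cross_operation(parent1: list, parent2: list):
--     child1 = list(parent1)
--     child2 = list(parent2)
--
--     c = 0; p = 0; f = 0
--     for i in range(len(child1)):
--         if child1[i][0] == 'C':
--             while (c < len(parent2)):
--                 if parent2[c][0] == 'C':
--                     child1[i] = list(parent2[c])
--                     c += 1
--                     break
--                 c += 1
--         elif child1[i][0] == 'P':
--             while (p < len(parent2)):
--                 if parent2[p][0] == 'P':
--                     child1[i] = list(parent2[p])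
--                     p += 1
--                     break
--                 p += 1
--         else:
--             while (f < len(parent2)):
--                 if parent2[f][0] == 'F':
--                     child1[i] = list(parent2[f])
--                     f += 1
--                     break
--                 f += 1
--
--     c = 0; p = 0; f = 0
--     for i in range(len(child2)):
--         if child2[i][0] == 'C':
--             while (c < len(parent1)):
--                 if parent1[c][0] == 'C':
--                     child2[i] = list(parent1[c])
--                     c += 1
--                     break
--                 c += 1
--         elif child2[i][0] == 'P':
--             while (p < len(parent1)):
--                 if parent1[p][0] == 'P':
--                     child2[i] = list(parent1[p])
--                     p += 1
--                     break
--                 p += 1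
--         else:
--             while (f < len(parent1)):
--                 if parent1[f][0] == 'F':
--                     child2[i] = list(parent1[f])
--                     f += 1
--                     break
--                 f += 1
--
--     return child1, child2
-- ===== SOURCE B (Python) =====
-- def cross_operation(parent1: list, parent2: list):
--     def make_child(base, donor):
--         groups = {k: [e for e in donor if e[0] == k] for k in ('C', 'P', 'F')}
--         used = {'C': 0, 'P': 0, 'F': 0}
--         child = list(base)
--         for i, e in enumerate(base):
--             key = e[0] if e[0] in ('C', 'P') else 'F'
--             g = groups[key]
--             j = used[key]
--             if j < len(g):
--                 child[i] = list(g[j])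
--                 used[key] = j + 1
--         return child
--     return make_child(parent1, parent2), make_child(parent2, parent1)
-- ===== Notes on version B (the rewrite author's own statement) =====
-- stated objective: idiomatic
-- what changed: Replaces A's six resumable while-scans over persistent raw indices with a one-shot partition of each donor into C/P/F groups that are then consumed by per-category counters.
import Mathlib
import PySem

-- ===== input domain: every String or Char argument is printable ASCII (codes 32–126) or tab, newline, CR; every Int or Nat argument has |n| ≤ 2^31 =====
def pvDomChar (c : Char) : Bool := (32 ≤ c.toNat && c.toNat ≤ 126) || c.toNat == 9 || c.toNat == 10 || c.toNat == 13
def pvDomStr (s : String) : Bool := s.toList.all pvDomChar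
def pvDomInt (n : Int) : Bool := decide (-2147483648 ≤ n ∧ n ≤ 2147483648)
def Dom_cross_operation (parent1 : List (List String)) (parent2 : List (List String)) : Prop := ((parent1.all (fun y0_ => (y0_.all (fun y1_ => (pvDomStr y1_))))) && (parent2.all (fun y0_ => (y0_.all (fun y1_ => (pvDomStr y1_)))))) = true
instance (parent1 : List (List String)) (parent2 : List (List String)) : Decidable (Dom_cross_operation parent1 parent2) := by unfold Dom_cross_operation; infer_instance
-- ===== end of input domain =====

-- B replaces A's six stateful while-scans with a one-shot partition of each donor into
-- C/P/F groups consumed by per-category counters (objective: simpler/idiomatic).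

-- ===== PORT A =====
-- A's inner `while (k < len(donor)): if donor[k][0] == tgt: take it; k += 1` scan:
-- returns the taken element (if any) and the counter's new value.
def scanFor (tgt : String) (donor : List (List String)) (k : Nat) :
    Option (List String) × Nat :=
  if h : k < donor.length then
    if (donor[k]).headD "" = tgt then (some donor[k], k + 1)
    else scanFor tgt donor (k + 1)
  else (none, k)
termination_by donor.length - k

-- A's `for i in range(len(child))` loop with the persistent counters c, p, f.
def loopA (donor : List (List String)) :
    List (List String) → Nat → Nat → Nat → List (List String)
  | [], _, _, _ => []
  | e :: rest, c, p, f =>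
    if e.headD "" = "C" then
      match scanFor "C" donor c with
      | (some e', c') => e' :: loopA donor rest c' p f
      | (none, c') => e :: loopA donor rest c' p f
    else if e.headD "" = "P" then
      match scanFor "P" donor p with
      | (some e', p') => e' :: loopA donor rest c p' f
      | (none, p') => e :: loopA donor rest c p' f
    else
      match scanFor "F" donor f with
      | (some e', f') => e' :: loopA donor rest c p f'
      | (none, f') => e :: loopA donor rest c p f'

def cross_operation (parent1 : List (List String)) (parent2 : List (List String)) :
    List (List String) × List (List String) :=
  (loopA parent2 parent1 0 0 0, loopA parent1 parent2 0 0 0)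

-- ===== PORT B =====
-- Source B's `[e for e in donor if e[0] == k]` group.
def groupOf (tgt : String) (donor : List (List String)) : List (List String) :=
  donor.filter (fun e => e.headD "" = tgt)

-- Source B's `for i, e in enumerate(base)` loop with the three `used` counters.
def buildChild (gC gP gF : List (List String)) :
    List (List String) → Nat → Nat → Nat → List (List String)
  | [], _, _, _ => []
  | e :: rest, uc, up, uf =>
    if e.headD "" = "C" then
      match gC[uc]? with
      | some g => g :: buildChild gC gP gF rest (uc + 1) up uf
      | none => e :: buildChild gC gP gF rest uc up uf
    else if e.headD "" = "P" then
      match gP[up]? with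
      | some g => g :: buildChild gC gP gF rest uc (up + 1) uf
      | none => e :: buildChild gC gP gF rest uc up uf
    else
      match gF[uf]? with
      | some g => g :: buildChild gC gP gF rest uc up (uf + 1)
      | none => e :: buildChild gC gP gF rest uc up uf

def makeChild (base donor : List (List String)) : List (List String) :=
  buildChild (groupOf "C" donor) (groupOf "P" donor) (groupOf "F" donor) base 0 0 0

def cross_operation_alt (parent1 : List (List String)) (parent2 : List (List String)) :
    List (List String) × List (List String) :=
  (makeChild parent1 parent2, makeChild parent2 parent1)

-- ===== PRECONDITION & SPEC =====
-- A indexes element[0] of every element of both parents, so it raises IndexError exactly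
-- when some inner list is empty; Pre_ excludes exactly those inputs.
def Pre_cross_operation (parent1 : List (List String)) (parent2 : List (List String)) : Prop :=
  (∀ e ∈ parent1, e ≠ []) ∧ (∀ e ∈ parent2, e ≠ [])
instance (parent1 : List (List String)) (parent2 : List (List String)) : Decidable (Pre_cross_operation parent1 parent2) := by unfold Pre_cross_operation; infer_instance

def pvWitness_cross_operation : List (List String) × List (List String) :=
  ([["C", "1"], ["P", "2"], ["F", "3"]], [["P", "4"], ["C", "5"], ["F", "6"]])

def Spec_cross_operation (parent1 : List (List String)) (parent2 : List (List String)) (out : List (List String) × List (List String)) : Prop := out = cross_operation_alt parent1 parent2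
instance (parent1 : List (List String)) (parent2 : List (List String)) (out : List (List String) × List (List String)) : Decidable (Spec_cross_operation parent1 parent2 out) := by unfold Spec_cross_operation; infer_instance

-- ===== CLAIM (what is proved, stated in full; the proofs are below) =====
def Claim_equal_cross_operation : Prop := ∀ (parent1 : List (List String)) (parent2 : List (List String)), Dom_cross_operation parent1 parent2 → Pre_cross_operation parent1 parent2 → Spec_cross_operation parent1 parent2 (cross_operation parent1 parent2)

-- ===== LEMMAS AND PROOFS =====

-- A's scan, started at a counter whose remaining matches are exactly the suffix of the
-- group, returns the head of that suffix and advances the counter past it.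
theorem scanFor_spec (tgt : String) (donor : List (List String)) (k : Nat)
    (L : List (List String))
    (hL : (donor.drop k).filter (fun e => e.headD "" = tgt) = L) :
    (scanFor tgt donor k).1 = L.head? ∧
      ((donor.drop (scanFor tgt donor k).2).filter (fun e => e.headD "" = tgt)) = L.tail := by
  induction k using scanFor.induct tgt donor with
  | case1 k h hmatch =>
    rw [List.drop_eq_getElem_cons h, List.filter_cons_of_pos (by simpa using hmatch)] at hL
    subst hL
    rw [scanFor, dif_pos h, if_pos hmatch]
    exact ⟨rfl, rfl⟩
  | case2 k h hmatch ih =>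
    rw [List.drop_eq_getElem_cons h, List.filter_cons_of_neg (by simpa using hmatch)] at hL
    rw [scanFor, dif_pos h, if_neg hmatch]
    exact ih hL
  | case3 k h =>
    rw [List.drop_eq_nil_of_le (by omega), List.filter_nil] at hL
    subst hL
    rw [scanFor, dif_neg h]
    exact ⟨rfl, by rw [List.drop_eq_nil_of_le (by omega)]; rfl⟩

-- Main invariant: A's loop with raw counters equals B's loop with per-group counters
-- whenever each raw counter's remaining matches are the corresponding group suffix.
theorem loopA_eq_buildChild (donor : List (List String)) (base : List (List String)) :
    ∀ (c p f uc up uf : Nat),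
    (donor.drop c).filter (fun e => e.headD "" = "C") = (groupOf "C" donor).drop uc →
    (donor.drop p).filter (fun e => e.headD "" = "P") = (groupOf "P" donor).drop up →
    (donor.drop f).filter (fun e => e.headD "" = "F") = (groupOf "F" donor).drop uf →
    loopA donor base c p f =
      buildChild (groupOf "C" donor) (groupOf "P" donor) (groupOf "F" donor) base uc up uf := by
  induction base with
  | nil => intro _ _ _ _ _ _ _ _ _; rfl
  | cons e rest ih =>
    intro c p f uc up uf hC hP hF
    by_cases hc : e.headD "" = "C"
    · obtain ⟨h1, h2⟩ := scanFor_spec "C" donor c _ hC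
      rw [List.head?_drop] at h1
      rw [List.tail_drop] at h2
      simp only [loopA, buildChild]
      rw [if_pos hc, if_pos hc]
      rcases hsf : scanFor "C" donor c with ⟨o, k'⟩
      rw [hsf] at h1 h2
      cases hg : (groupOf "C" donor)[uc]? with
      | some g =>
        rw [hg] at h1
        cases o with
        | none => simp at h1
        | some e' =>
          have he : e' = g := by simpa using h1
          rw [he]
          exact congrArg (g :: ·) (ih k' p f (uc + 1) up uf h2 hP hF)
      | none =>
        rw [hg] at h1
        cases o with
        | some e' => simp at h1
        | none =>
          have hle : (groupOf "C" donor).length ≤ uc := by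
            by_contra hlt
            rw [not_le] at hlt
            rw [List.getElem?_eq_none_iff] at hg
            omega
          have hdropeq : (groupOf "C" donor).drop (uc + 1) = (groupOf "C" donor).drop uc := by
            rw [List.drop_eq_nil_of_le hle, List.drop_eq_nil_of_le (by omega)]
          rw [hdropeq] at h2
          exact congrArg (e :: ·) (ih k' p f uc up uf h2 hP hF)
    · by_cases hp : e.headD "" = "P"
      · obtain ⟨h1, h2⟩ := scanFor_spec "P" donor p _ hP
        rw [List.head?_drop] at h1
        rw [List.tail_drop] at h2
        simp only [loopA, buildChild]
        rw [if_neg hc, if_neg hc, if_pos hp, if_pos hp]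
        rcases hsf : scanFor "P" donor p with ⟨o, k'⟩
        rw [hsf] at h1 h2
        cases hg : (groupOf "P" donor)[up]? with
        | some g =>
          rw [hg] at h1
          cases o with
          | none => simp at h1
          | some e' =>
            have he : e' = g := by simpa using h1
            rw [he]
            exact congrArg (g :: ·) (ih c k' f uc (up + 1) uf hC h2 hF)
        | none =>
          rw [hg] at h1
          cases o with
          | some e' => simp at h1
          | none =>
            have hle : (groupOf "P" donor).length ≤ up := by
              by_contra hlt
              rw [not_le] at hlt
              rw [List.getElem?_eq_none_iff] at hg
              omega
            have hdropeq : (groupOf "P" donor).drop (up + 1) = (groupOf "P" donor).drop up := by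
              rw [List.drop_eq_nil_of_le hle, List.drop_eq_nil_of_le (by omega)]
            rw [hdropeq] at h2
            exact congrArg (e :: ·) (ih c k' f uc up uf hC h2 hF)
      · obtain ⟨h1, h2⟩ := scanFor_spec "F" donor f _ hF
        rw [List.head?_drop] at h1
        rw [List.tail_drop] at h2
        simp only [loopA, buildChild]
        rw [if_neg hc, if_neg hc, if_neg hp, if_neg hp]
        rcases hsf : scanFor "F" donor f with ⟨o, k'⟩
        rw [hsf] at h1 h2
        cases hg : (groupOf "F" donor)[uf]? with
        | some g =>
          rw [hg] at h1
          cases o with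
          | none => simp at h1
          | some e' =>
            have he : e' = g := by simpa using h1
            rw [he]
            exact congrArg (g :: ·) (ih c p k' uc up (uf + 1) hC hP h2)
        | none =>
          rw [hg] at h1
          cases o with
          | some e' => simp at h1
          | none =>
            have hle : (groupOf "F" donor).length ≤ uf := by
              by_contra hlt
              rw [not_le] at hlt
              rw [List.getElem?_eq_none_iff] at hg
              omega
            have hdropeq : (groupOf "F" donor).drop (uf + 1) = (groupOf "F" donor).drop uf := by
              rw [List.drop_eq_nil_of_le hle, List.drop_eq_nil_of_le (by omega)]
            rw [hdropeq] at h2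
            exact congrArg (e :: ·) (ih c p k' uc up uf hC hP h2)

theorem loopA_eq_makeChild (donor base : List (List String)) :
    loopA donor base 0 0 0 = makeChild base donor := by
  unfold makeChild
  exact loopA_eq_buildChild donor base 0 0 0 0 0 0 rfl rfl rfl

-- ===== VERDICT (by name: the statement is the Claim_ definition above) =====
theorem cross_operation_spec : Claim_equal_cross_operation := by
  intro parent1 parent2 _ _
  unfold Spec_cross_operation cross_operation cross_operation_alt
  rw [loopA_eq_makeChild, loopA_eq_makeChild]
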